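/- GENERATED by farm/mkstatement.py from design/units.tsv (unit `decode_all.7`) and the assertions of Vorbis/Spec/DecodeAll.lean — do not edit.
   THE STATEMENT of the proof unit `decode_all.7`: segment 7 of `decode_all` (10 instructions; entries 0x10351d;
   exits ret; ranges 0x10351d-0x103544)
   takes each of its entry assertions to one of its exit assertions (`Vorbis.Spec.decode_all.Seg7`), given the contracts of its callees.
   What the names mean: Vorbis/Spec/Basic.lean (the shared hypotheses), Vorbis/Spec/DecodeAll.lean (the assertions). The theorem to prove:
   `theorem decode_all_7_ok : Vorbis.Spec.decode_all_7.Statement`. -/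
import Vorbis.Spec.DecodeAll
namespace Vorbis.Spec.decode_all_7
open X86 X86.User Asan

/-- The statement of unit `decode_all.7`. -/
def Statement : Prop :=
  ∀ (Lay : Layout) (_hLay : Lay.hi = 0x1000000) (μ : Microarch) (_hμ : UserX.MicroOK μ) (u₀ : State)
    (_hcode : HasCodeNat Lay u₀ Vorbis.L.decode_all.entry Vorbis.Code.code_decode_all.nat Vorbis.L.decode_all.size),
    Vorbis.Spec.decode_all.Seg7 Lay μ u₀

end Vorbis.Spec.decode_all_7
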